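-- pv_equiv track=rewrite | github.com/yinkaisheng/Python-UIAutomation-for-Windows | demos/rename_pdf_bookmark.py | Rename1
-- ===== SOURCE A (Python) =====
-- MatchWords = ['chapter', 'ch', 'section', 'hour', 'lession', 'tutorial']#, 'step'
--
-- Punctuation = '!"\',:;?)'  # '!"\',.:;?)'
--
-- def Rename1(name, removeChapter = True):
--     alert = False
--     newName = name.strip().replace('‘', '\'').replace('’', '\'').replace('“', '"').replace('”', '"')
--     #newName = newName.replace('.', ' ')
--     #newName = newName.replace('_ _', '__')
--     #newName = newName.replace('_  _', '__')
--     words = newName.split()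
--     if len(words) == 0:
--         return '', alert
--     firstWord = words[0].lower()
--     if removeChapter and firstWord in MatchWords and len(words) > 2:
--         del words[0]
--     i = 0
--     while i < len(words):
--         if words[i][0] in Punctuation:
--             if i > 0 and len(words[i]) == 1:
--                 alert = True
--                 words[i-1] += words[i]
--                 del words[i]
--                 i -= 1
--                 continue
--         i += 1
--     newName = ' '.join(words)
--     return newName, alert
-- ===== SOURCE B (Python) =====
-- MatchWords = ['chapter', 'ch', 'section', 'hour', 'lession', 'tutorial']
--
-- Punctuation = '!"\',:;?)'
--
-- def Rename1(name, removeChapter = True):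
--     newName = name.strip().replace('\u2018', '\'').replace('\u2019', '\'').replace('\u201c', '"').replace('\u201d', '"')
--     words = newName.split()
--     if not words:
--         return '', False
--     if removeChapter and words[0].lower() in MatchWords and len(words) > 2:
--         words = words[1:]
--     out = []
--     alert = False
--     for w in words:
--         if len(w) == 1 and w in Punctuation and out:
--             alert = True
--             out[-1] += w
--         else:
--             out.append(w)
--     return ' '.join(out), alert
-- ===== Notes on version B (the rewrite author's own statement) =====
-- stated objective: simpler
-- what changed: The in-place while-loop that deletes lone punctuation words with del and index rewind is replaced by a single forward pass that appends each word to a new list, merging a lone punctuation word into the previous output word.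
import Mathlib
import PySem

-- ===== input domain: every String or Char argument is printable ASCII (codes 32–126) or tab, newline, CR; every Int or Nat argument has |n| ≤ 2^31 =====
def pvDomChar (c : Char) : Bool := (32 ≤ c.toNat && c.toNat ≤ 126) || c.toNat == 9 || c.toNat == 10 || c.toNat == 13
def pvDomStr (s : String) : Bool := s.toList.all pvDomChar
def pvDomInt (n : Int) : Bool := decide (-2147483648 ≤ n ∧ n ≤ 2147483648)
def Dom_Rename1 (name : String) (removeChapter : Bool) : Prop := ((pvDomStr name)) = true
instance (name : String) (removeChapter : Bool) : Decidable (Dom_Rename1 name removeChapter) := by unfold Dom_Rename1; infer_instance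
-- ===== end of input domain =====

-- B replaces A's in-place while-loop (del + index rewind) by a single forward pass
-- building a fresh output list; same return value.

-- ===== PORT A =====
def pvMatchWords : List (List Char) :=
  ["chapter".toList, "ch".toList, "section".toList, "hour".toList, "lession".toList, "tutorial".toList]

def pvPunctuation : List Char := "!\"',:;?)".toList

-- name.strip().replace('‘', '\'').replace('’', '\'').replace('“', '"').replace('”', '"') on code points
def pvPrep (name : String) : List Char :=
  PySem.Chars.replace (PySem.Chars.replace (PySem.Chars.replace (PySem.Chars.replace
    (PySem.Chars.strip name.toList) ['‘'] ['\'']) ['’'] ['\'']) ['“'] ['"']) ['”'] ['"']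

-- A's while-loop: index i into the (mutated-in-place) list words; the fuel argument
-- only makes the loop structurally total (2*len+1 steps always suffice, proved below)
def pvLoopA (fuel : Nat) (ws : List (List Char)) (i : Nat) (alert : Bool) :
    List (List Char) × Bool :=
  match fuel with
  | 0 => (ws, alert)
  | f + 1 =>
    if i < ws.length then
      let w := ws.getD i []
      if w.headD ' ' ∈ pvPunctuation then        -- words[i][0] in Punctuation
        if 0 < i ∧ w.length = 1 then             -- i > 0 and len(words[i]) == 1
          -- words[i-1] += words[i]; del words[i]; i -= 1; continue
          pvLoopA f (ws.take (i-1) ++ [ws.getD (i-1) [] ++ w] ++ ws.drop (i+1)) (i-1) true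
        else pvLoopA f ws (i+1) alert
      else pvLoopA f ws (i+1) alert
    else (ws, alert)

def Rename1 (name : String) (removeChapter : Bool) : String × Bool :=
  let words := PySem.Chars.split₀ (pvPrep name)
  if words.length = 0 then ("", false)
  else
    let firstWord := PySem.Chars.lower (words.headD [])
    let words1 := if removeChapter && pvMatchWords.contains firstWord && decide (2 < words.length)
                  then words.drop 1 else words
    let r := pvLoopA (2 * words1.length + 1) words1 0 false
    (String.ofList (PySem.Chars.join [' '] r.1), r.2)

-- ===== PORT B =====
-- single forward pass: merge a lone punctuation word into the last output word
def pvLoopB (rest : List (List Char)) (out : List (List Char)) (alert : Bool) :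
    List (List Char) × Bool :=
  match rest with
  | [] => (out, alert)
  | w :: rs =>
    if w.length = 1 ∧ PySem.Chars.isIn w pvPunctuation ∧ out ≠ [] then
      pvLoopB rs (out.dropLast ++ [out.getLastD [] ++ w]) true
    else pvLoopB rs (out ++ [w]) alert

def Rename1_alt (name : String) (removeChapter : Bool) : String × Bool :=
  let words := PySem.Chars.split₀ (pvPrep name)
  if words = [] then ("", false)
  else
    let words1 := if removeChapter && pvMatchWords.contains (PySem.Chars.lower (words.headD []))
                     && decide (2 < words.length)
                  then words.drop 1 else words
    let r := pvLoopB words1 [] false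
    (String.ofList (PySem.Chars.join [' '] r.1), r.2)

-- ===== PRECONDITION & SPEC =====
def Spec_Rename1 (name : String) (removeChapter : Bool) (out : String × Bool) : Prop := out = Rename1_alt name removeChapter
instance (name : String) (removeChapter : Bool) (out : String × Bool) : Decidable (Spec_Rename1 name removeChapter out) := by unfold Spec_Rename1; infer_instance

-- ===== CLAIM (what is proved, stated in full; the proofs are below) =====
def Claim_equal_Rename1 : Prop := ∀ (name : String) (removeChapter : Bool), Dom_Rename1 name removeChapter → Spec_Rename1 name removeChapter (Rename1 name removeChapter)

-- ===== LEMMAS AND PROOFS =====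

-- every word produced by split() is nonempty
lemma split₀_go_ne_nil (s cur : List Char) (acc : List (List Char))
    (hacc : ∀ w ∈ acc, w ≠ []) :
    ∀ w ∈ PySem.Chars.split₀.go s cur acc, w ≠ [] := by
  induction s generalizing cur acc with
  | nil =>
    intro w hw
    simp only [PySem.Chars.split₀.go] at hw
    split at hw
    · exact hacc w (List.mem_reverse.mp hw)
    · rename_i hcur
      rcases List.mem_cons.mp (List.mem_reverse.mp hw) with h | h
      · subst h
        intro hc
        exact hcur (by simp [List.reverse_eq_nil_iff.mp hc])
      · exact hacc w h
  | cons c rest ih =>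
    intro w hw
    simp only [PySem.Chars.split₀.go] at hw
    split at hw
    · split at hw
      · exact ih [] acc hacc w hw
      · rename_i hcur
        refine ih [] (cur.reverse :: acc) ?_ w hw
        intro v hv
        rcases List.mem_cons.mp hv with h | h
        · subst h
          intro hc
          exact hcur (by simp [List.reverse_eq_nil_iff.mp hc])
        · exact hacc v h
    · exact ih (c :: cur) acc hacc w hw

lemma split₀_ne_nil (s : List Char) : ∀ w ∈ PySem.Chars.split₀ s, w ≠ [] := by
  intro w hw
  exact split₀_go_ne_nil s [] [] (by simp) w hw

-- a merged word can never re-trigger A's deletion (its length is ≥ 2), so after the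
-- 'continue' re-check A steps straight back to the next index: the two loops agree.
lemma loop_eq (rest : List (List Char)) :
    ∀ (out : List (List Char)) (alert : Bool) (fuel : Nat),
      out.length + 2 * rest.length < fuel →
      (∀ w ∈ out, w ≠ []) → (∀ w ∈ rest, w ≠ []) →
      pvLoopA fuel (out ++ rest) out.length alert = pvLoopB rest out alert := by
  induction rest with
  | nil =>
    intro out alert fuel hfuel _ _
    obtain ⟨f, rfl⟩ : ∃ f, fuel = f + 1 := ⟨fuel - 1, by omega⟩
    simp [pvLoopA, pvLoopB]
  | cons w rs ih =>
    intro out alert fuel hfuel hout hrest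
    obtain ⟨f, rfl⟩ : ∃ f, fuel = f + 1 := ⟨fuel - 1, by omega⟩
    have hw : w ≠ [] := hrest w (by simp)
    have hrs : ∀ v ∈ rs, v ≠ [] := fun v hv => hrest v (by simp [hv])
    by_cases hmerge : w.length = 1 ∧ PySem.Chars.isIn w pvPunctuation = true ∧ out ≠ []
    · -- merge step
      obtain ⟨h1, hin, hne⟩ := hmerge
      obtain ⟨c, rfl⟩ : ∃ c, w = [c] := by
        match w, h1 with
        | [c], _ => exact ⟨c, rfl⟩
      have hc : c ∈ pvPunctuation :=
        ((PySem.Chars.isIn_iff_infix _ _).mp hin).subset (by simp)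
      rcases List.eq_nil_or_concat out with rfl | ⟨ys, a, h⟩
      · exact absurd rfl hne
      rw [List.concat_eq_append] at h; subst h
      have ha : a ≠ [] := hout a (by simp)
      obtain ⟨a0, a', rfl⟩ := List.exists_cons_of_ne_nil ha
      have hf : ∃ g, f = g + 1 := by
        simp only [List.length_append, List.length_cons, List.length_nil] at hfuel
        exact ⟨f - 1, by omega⟩
      obtain ⟨g, rfl⟩ := hf
      -- A's merge step
      rw [pvLoopA]
      have hlen : (ys ++ [a0 :: a']).length < ((ys ++ [a0 :: a']) ++ [c] :: rs).length := by simp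
      have hget : ((ys ++ [a0 :: a']) ++ [c] :: rs).getD (ys ++ [a0 :: a']).length [] = [c] := by
        simp [List.getD]
      simp only [if_pos hlen, hget]
      rw [if_pos (by simpa using hc), if_pos ⟨by simp, rfl⟩]
      have e1 : (ys ++ [a0 :: a']).length - 1 = ys.length := by simp
      have e2 : (ys ++ [a0 :: a']).length + 1 = ys.length + 2 := by simp
      rw [e1, e2]
      have htake : ((ys ++ [a0 :: a']) ++ [c] :: rs).take ys.length = ys := by simp
      have hgetp : ((ys ++ [a0 :: a']) ++ [c] :: rs).getD ys.length [] = a0 :: a' := by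
        simp [List.getD]
      have hdrop : ((ys ++ [a0 :: a']) ++ [c] :: rs).drop (ys.length + 2) = rs := by
        simp [List.drop_append]
      rw [htake, hgetp, hdrop]
      -- A re-checks the merged word (length ≥ 2): a no-op step forward
      have hstep : pvLoopA (g + 1) ((ys ++ [a0 :: a' ++ [c]]) ++ rs) ys.length true
                 = pvLoopA g ((ys ++ [a0 :: a' ++ [c]]) ++ rs) (ys.length + 1) true := by
        rw [pvLoopA]
        have hlt : ys.length < ((ys ++ [a0 :: a' ++ [c]]) ++ rs).length := by simp
        have hg : ((ys ++ [a0 :: a' ++ [c]]) ++ rs).getD ys.length [] = a0 :: a' ++ [c] := by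
          simp [List.getD]
        simp only [if_pos hlt, hg]
        -- the merged word has length ≥ 2, so the inner delete-branch cannot fire
        split
        · simp
        · rfl
      have hassoc : ys ++ [a0 :: a' ++ [c]] ++ rs = (ys ++ [a0 :: a' ++ [c]]) ++ rs := by simp
      rw [hassoc, hstep]
      have := ih (ys ++ [a0 :: a' ++ [c]]) true g
        (by simp only [List.length_append, List.length_cons, List.length_nil] at hfuel ⊢
            omega)
        (by intro v hv
            rcases List.mem_append.mp hv with h | h
            · exact hout v (by simp [h])
            · simp at h; subst h; simp) hrs
      simp only [List.length_append, List.length_cons, List.length_nil] at this ⊢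
      rw [this]
      -- B's merge step
      rw [pvLoopB]
      rw [if_pos ⟨rfl, hin, by simp⟩]
      simp
    · -- plain append step
      have hlen : out.length < (out ++ w :: rs).length := by simp
      have hget : (out ++ w :: rs).getD out.length [] = w := by
        simp [List.getD]
      rw [pvLoopA]
      simp only [if_pos hlen, hget]
      have hB : pvLoopB (w :: rs) out alert = pvLoopB rs (out ++ [w]) alert := by
        rw [pvLoopB, if_neg (by simpa using hmerge)]
      have hnext : pvLoopA f (out ++ w :: rs) (out.length + 1) alert
                 = pvLoopB rs (out ++ [w]) alert := by
        have := ih (out ++ [w]) alert f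
          (by simp only [List.length_append, List.length_cons, List.length_nil] at hfuel ⊢
              omega)
          (by intro v hv
              rcases List.mem_append.mp hv with h | h
              · exact hout v h
              · simp at h; subst h; exact hw) hrs
        simpa using this
      rw [hB, ← hnext]
      by_cases hp : w.headD ' ' ∈ pvPunctuation
      · rw [if_pos hp]
        have hn : ¬ (0 < out.length ∧ w.length = 1) := by
          rintro ⟨hpos, h1⟩
          obtain ⟨c, rfl⟩ : ∃ c, w = [c] := by
            match w, h1 with
            | [c], _ => exact ⟨c, rfl⟩
          apply hmerge
          refine ⟨rfl, ?_, by intro h; subst h; simp at hpos⟩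
          rw [PySem.Chars.isIn_iff_infix]
          simp only [List.headD_cons] at hp
          rcases List.append_of_mem hp with ⟨s, t, h⟩
          exact ⟨s, t, by simp [h]⟩
        rw [if_neg hn]
      · rw [if_neg hp]

-- ===== VERDICT (by name: the statement is the Claim_ definition above) =====
theorem Rename1_spec : Claim_equal_Rename1 := by
  intro name removeChapter _
  unfold Spec_Rename1 Rename1 Rename1_alt
  simp only [List.length_eq_zero_iff]
  by_cases hnil : PySem.Chars.split₀ (pvPrep name) = []
  · simp [hnil]
  · simp only [if_neg hnil]
    have hne : ∀ w ∈ (if removeChapter && pvMatchWords.contains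
          (PySem.Chars.lower ((PySem.Chars.split₀ (pvPrep name)).headD []))
          && decide (2 < (PySem.Chars.split₀ (pvPrep name)).length)
        then (PySem.Chars.split₀ (pvPrep name)).drop 1
        else PySem.Chars.split₀ (pvPrep name)), w ≠ [] := by
      intro w hw
      split at hw
      · exact split₀_ne_nil _ w (List.drop_subset _ _ hw)
      · exact split₀_ne_nil _ w hw
    have := loop_eq _ [] false (2 * (if removeChapter && pvMatchWords.contains
          (PySem.Chars.lower ((PySem.Chars.split₀ (pvPrep name)).headD []))
          && decide (2 < (PySem.Chars.split₀ (pvPrep name)).length)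
        then (PySem.Chars.split₀ (pvPrep name)).drop 1
        else PySem.Chars.split₀ (pvPrep name)).length + 1)
      (by simp) (by simp) hne
    simp only [List.nil_append, List.length_nil] at this
    rw [this]
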